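-- pv_equiv track=rewrite | github.com/RyanDDDDDD/23T2COMP9044 | COMP9044ass2/sheepy.py | getLastCommand
-- ===== SOURCE A (Python) =====
-- def splitCondition(args):
--   """
--   split all conditions and external commands by && and ||
--   """
--   ret = []
--
--   temp = []
--   for arg in args:
--     if (arg == "&&" or arg == "||"):
--       ret.append([x for x in temp])
--       temp.clear()
--       temp.append(arg)
--       ret.append([x for x in temp])
--       temp.clear()
--       continue
--
--     temp.append(arg)
--
--   # add last condition
--   ret.append([x for x in temp])
--
--   return [x for x in ret if x != []]
--
-- def getLastCommand(args):
--   """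
--   extract the last external commands from arguments and remove the extracted arguments
--   """
--
--   conditions = splitCondition(args)
--
--   lastCommand = conditions[-1]
--
--   # remove the last two elements, which are &&/|| and external commands
--   conditions.pop()
--
--   args = []
--
--   for condition in conditions:
--     args += [ arg for arg in condition ]
--
--   return lastCommand,args
-- ===== SOURCE B (Python) =====
-- def getLastCommand(args):
--   """
--   extract the last external command from arguments and remove the extracted arguments
--   """
--   last = args[-1]          # IndexError on empty args, as in the original
--   if last == "&&" or last == "||":
--     return [last], args[:-1]
--   j = -1
--   for i, arg in enumerate(args):
--     if arg == "&&" or arg == "||":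
--       j = i
--   return args[j+1:], args[:j+1]
-- ===== Notes on version B (the rewrite author's own statement) =====
-- stated objective: simpler
-- what changed: B drops splitCondition's interleaved group building, popping and re-flattening and instead computes the split boundary directly: if the last token is '&&'/'||' it is the last command alone, otherwise one scan records the index j of the last separator and the result is (args[j+1:], args[:j+1]).
import Mathlib
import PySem

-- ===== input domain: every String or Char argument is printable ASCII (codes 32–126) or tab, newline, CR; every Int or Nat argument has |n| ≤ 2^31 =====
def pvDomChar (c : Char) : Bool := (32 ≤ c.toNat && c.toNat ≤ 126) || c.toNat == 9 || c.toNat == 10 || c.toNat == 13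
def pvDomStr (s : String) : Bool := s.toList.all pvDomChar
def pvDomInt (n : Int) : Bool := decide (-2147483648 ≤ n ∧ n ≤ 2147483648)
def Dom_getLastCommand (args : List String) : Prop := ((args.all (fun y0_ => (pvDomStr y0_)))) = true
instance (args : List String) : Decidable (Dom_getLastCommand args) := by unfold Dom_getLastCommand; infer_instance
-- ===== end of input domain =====

-- B replaces A's build-groups-then-flatten strategy (splitCondition) by a direct computation of the
-- split boundary (index of the last "&&"/"||") and two slices; objective: simpler, same O(n) cost.

-- ===== PORT A =====
-- loop body of splitCondition: state = (ret, temp)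
def splitConditionStep (p : List (List String) × List String) (arg : String) :
    List (List String) × List String :=
  if arg = "&&" ∨ arg = "||" then (p.1 ++ [p.2] ++ [[arg]], [])
  else (p.1, p.2 ++ [arg])

def splitCondition (args : List String) : List (List String) :=
  let st := args.foldl splitConditionStep ([], [])
  -- 'ret.append([x for x in temp])' then 'return [x for x in ret if x != []]'
  (st.1 ++ [st.2]).filter (· ≠ [])

def getLastCommand (args : List String) : List String × List String :=
  let conditions := splitCondition args
  match PySem.List.pyGet? conditions (-1) with  -- conditions[-1]; none = IndexError (excluded by Pre_)
  | none => ([], [])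
  | some lastCommand =>
    let conditions := conditions.dropLast       -- conditions.pop(): exact here, conditions ≠ []
    -- for condition in conditions: args += [arg for arg in condition]
    (lastCommand, conditions.foldl (fun acc c => acc ++ c) [])

-- ===== PORT B =====
-- loop body of B's scan for the index of the last separator: state = (j, i)
def pvJStep (p : Int × Int) (arg : String) : Int × Int :=
  (if arg = "&&" ∨ arg = "||" then p.2 else p.1, p.2 + 1)

def getLastCommand_alt (args : List String) : List String × List String :=
  match PySem.List.pyGet? args (-1) with        -- args[-1]; none = IndexError (excluded by Pre_)
  | none => ([], [])
  | some last =>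
    if last = "&&" ∨ last = "||" then
      ([last], PySem.List.slice args none (some (-1)))        -- args[:-1]
    else
      let j := (args.foldl pvJStep (-1, 0)).1
      (PySem.List.slice args (some (j + 1)) none,             -- args[j+1:]
       PySem.List.slice args none (some (j + 1)))             -- args[:j+1]

-- ===== PRECONDITION & SPEC =====
-- Pre_ excludes only the empty list, on which A raises IndexError (conditions[-1] of []).
def Pre_getLastCommand (args : List String) : Prop := args ≠ []
instance (args : List String) : Decidable (Pre_getLastCommand args) := by unfold Pre_getLastCommand; infer_instance
def pvWitness_getLastCommand : List String := ["echo", "hi", "&&", "ls"]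

def Spec_getLastCommand (args : List String) (out : List String × List String) : Prop := out = getLastCommand_alt args
instance (args : List String) (out : List String × List String) : Decidable (Spec_getLastCommand args out) := by unfold Spec_getLastCommand; infer_instance

-- ===== CLAIM (what is proved, stated in full; the proofs are below) =====
def Claim_equal_getLastCommand : Prop := ∀ (args : List String), Dom_getLastCommand args → Pre_getLastCommand args → Spec_getLastCommand args (getLastCommand args)

-- ===== LEMMAS AND PROOFS =====

-- the second component of B's scan state counts the elements seen
theorem pvJ_snd (args : List String) (j i : Int) :
    (args.foldl pvJStep (j, i)).2 = i + args.length := by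
  induction args generalizing j i with
  | nil => simp
  | cons a as ih => simp [pvJStep, ih]; ring

theorem pv_foldl_append_acc (L : List (List String)) (init : List String) :
    L.foldl (fun acc c => acc ++ c) init = init ++ L.flatten := by
  induction L generalizing init with
  | nil => simp
  | cons c L ih => simp [ih]

theorem pv_flatten_filter (L : List (List String)) :
    (L.filter (fun c => !decide (c = []))).flatten = L.flatten := by
  induction L with
  | nil => rfl
  | cons c L ih =>
    by_cases h : c = [] <;> simp [List.filter_cons, h, ih]

theorem pv_filter_sep (r : List (List String)) (t : List String) (x : String) :
    ((r ++ [t] ++ [[x]] ++ [[]]).filter (fun c => !decide (c = []))) =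
      ((r ++ [t]).filter (fun c => !decide (c = []))) ++ [[x]] := by
  by_cases h : t = [] <;> simp [List.filter_append, List.filter_cons, h]

theorem pv_filter_nosep (r : List (List String)) (t : List String) (x : String) :
    ((r ++ [t ++ [x]]).filter (fun c => !decide (c = []))) =
      (r.filter (fun c => !decide (c = []))) ++ [t ++ [x]] := by
  simp [List.filter_append, List.filter_cons]

-- joint characterization of A's fold state and B's last-separator index
theorem pv_main (args : List String) :
    ∃ jn : Nat, jn ≤ args.length ∧ (args.foldl pvJStep (-1, 0)).1 + 1 = (jn : Int) ∧
      (args.foldl splitConditionStep ([], [])).1.flatten = args.take jn ∧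
      (args.foldl splitConditionStep ([], [])).2 = args.drop jn := by
  induction args using List.reverseRecOn with
  | nil => exact ⟨0, by simp⟩
  | append_singleton xs x ih =>
    obtain ⟨jn, hle, hj, hfl, htmp⟩ := ih
    rw [List.foldl_append, List.foldl_append]
    simp only [List.foldl_cons, List.foldl_nil]
    by_cases hx : x = "&&" ∨ x = "||"
    · refine ⟨xs.length + 1, by simp, ?_, ?_, ?_⟩
      · simp [pvJStep, hx, pvJ_snd]
      · simp only [splitConditionStep, hx, if_pos, List.flatten_append, hfl, htmp,
                   List.flatten_cons, List.flatten_nil, List.append_nil]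
        rw [List.take_append_drop, List.take_of_length_le (by simp)]
      · simp [splitConditionStep, hx]
    · refine ⟨jn, by simp; omega, ?_, ?_, ?_⟩
      · simp [pvJStep, hx, hj]
      · simp [splitConditionStep, hx, hfl, List.take_append_of_le_length hle]
      · simp [splitConditionStep, hx, htmp, List.drop_append_of_le_length hle]

-- ===== VERDICT (by name: the statement is the Claim_ definition above) =====
theorem getLastCommand_spec : Claim_equal_getLastCommand := by
  intro args _ hpre
  rcases List.eq_nil_or_concat args with rfl | ⟨xs, x, rfl⟩
  · exact absurd rfl hpre
  obtain ⟨jn, hle, hj, hfl, htmp⟩ := pv_main xs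
  simp only [Spec_getLastCommand, List.concat_eq_append]
  unfold getLastCommand getLastCommand_alt splitCondition
  simp only [List.foldl_append, List.foldl_cons, List.foldl_nil, ne_eq, decide_not]
  rw [PySem.List.pyGet?_neg_one_append_singleton]
  set S := List.foldl splitConditionStep ([], []) xs with hS
  by_cases hx : x = "&&" ∨ x = "||"
  · -- trailing separator: A's last group is [x]; both sides return ([x], xs)
    simp only [splitConditionStep, hx, if_pos]
    rw [show S.1 ++ [S.2] ++ [[x]] ++ [([] : List String)] =
          (S.1 ++ [S.2] ++ [[x]]) ++ [([] : List String)] from by simp,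
        show (S.1 ++ [S.2] ++ [[x]]) ++ [([] : List String)] =
          S.1 ++ [S.2] ++ [[x]] ++ [([] : List String)] from by simp]
    rw [pv_filter_sep, PySem.List.pyGet?_neg_one_append_singleton, List.dropLast_concat,
        pv_foldl_append_acc, PySem.List.slice_to_neg_one, List.dropLast_concat]
    rw [pv_flatten_filter]
    simp [hfl, htmp]
  · -- no trailing separator: last group is temp ++ [x]; split boundary is jn
    simp only [splitConditionStep, hx, ite_false, pvJStep]
    rw [pv_filter_nosep, PySem.List.pyGet?_neg_one_append_singleton, List.dropLast_concat,
        pv_foldl_append_acc, pv_flatten_filter, hj,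
        PySem.List.slice_from_natCast, PySem.List.slice_to_natCast]
    rw [Prod.mk.injEq]
    constructor
    · rw [htmp, List.drop_append_of_le_length hle]
    · rw [hfl]
      simp [List.take_append_of_le_length hle]
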